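-- pv_equiv track=rewrite | github.com/dmmVictor89/vscodeVim | util/browser/userscripts/qute-keepassxc.py | host_candidates
-- ===== SOURCE A (Python) =====
-- def host_candidates(host: str):
--     """
--     host가 sub.example.com 이면
--     우선순위:
--     - sub.example.com
--     - example.com
--     """
--     parts = host.split(".")
--     candidates = []
--     for i in range(len(parts) - 1):
--         cand = ".".join(parts[i:])
--         if "." in cand:
--             candidates.append(cand)
--     # 중복 제거
--     seen = set()
--     result = []
--     for x in candidates:
--         if x not in seen:
--             seen.add(x)
--             result.append(x)
--     return result
-- ===== SOURCE B (Python) =====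
-- def host_candidates(host: str):
--     # Build the dot-suffixes incrementally from the tail; no re-join per index,
--     # and no dedup pass (all suffixes have distinct lengths).
--     parts = host.split(".")
--     suffix = parts[-1]
--     result = []
--     for p in reversed(parts[:-1]):
--         suffix = p + "." + suffix
--         result.append(suffix)
--     return result[::-1]
-- ===== Notes on version B (the rewrite author's own statement) =====
-- stated objective: simpler
-- what changed: B builds each suffix incrementally from the tail (one concatenation per part) instead of re-joining a slice for every index, and drops both the always-true dot-membership test and the dedup pass, which is a no-op since the suffixes have strictly decreasing lengths.
import Mathlib
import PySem

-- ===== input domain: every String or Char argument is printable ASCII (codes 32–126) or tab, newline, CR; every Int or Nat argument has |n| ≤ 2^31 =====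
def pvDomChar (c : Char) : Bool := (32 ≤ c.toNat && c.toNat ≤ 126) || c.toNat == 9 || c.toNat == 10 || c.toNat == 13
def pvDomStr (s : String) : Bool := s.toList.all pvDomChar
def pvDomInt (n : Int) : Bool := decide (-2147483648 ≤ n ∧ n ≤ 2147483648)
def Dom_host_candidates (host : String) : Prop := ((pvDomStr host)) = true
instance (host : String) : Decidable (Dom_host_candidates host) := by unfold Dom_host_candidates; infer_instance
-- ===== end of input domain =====

-- B builds each dot-suffix incrementally from the tail in one pass and drops the dedup pass
-- (suffixes have strictly decreasing lengths, so they can never repeat); simpler, same asymptotics.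

-- ===== PORT A =====
def host_candidates (host : String) : List String :=
  let parts := (PySem.Str.split? host ".").getD []   -- sep "." ≠ "", so split? is never none
  let candidates := (PySem.List.pyRange 0 ((parts.length : Int) - 1)).foldl
    (fun acc i =>
      let cand := PySem.Str.join "." (PySem.List.slice parts (some i) none)
      if PySem.Str.isIn "." cand then acc ++ [cand] else acc) []
  let fin := candidates.foldl
    (fun (st : PySem.Set String × List String) x =>
      if PySem.Set.contains st.1 x then st else (PySem.Set.add st.1 x, st.2 ++ [x]))
    (PySem.Set.empty, ([] : List String))
  fin.2

-- ===== PORT B =====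
def host_candidates_alt (host : String) : List String :=
  let parts := (PySem.Str.split? host ".").getD []   -- sep "." ≠ "", so split? is never none
  match PySem.List.pyGet? parts (-1) with
  | none => []   -- unreachable: str.split never returns an empty list
  | some last =>
    let st := ((PySem.List.slice parts none (some (-1))).reverse).foldl
      (fun (st : String × List String) p =>
        let suffix := p ++ "." ++ st.1
        (suffix, st.2 ++ [suffix])) (last, ([] : List String))
    st.2.reverse

-- ===== PRECONDITION & SPEC =====
def Spec_host_candidates (host : String) (out : List String) : Prop := out = host_candidates_alt host
instance (host : String) (out : List String) : Decidable (Spec_host_candidates host out) := by unfold Spec_host_candidates; infer_instance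

-- ===== CLAIM (what is proved, stated in full; the proofs are below) =====
def Claim_equal_host_candidates : Prop := ∀ (host : String), Dom_host_candidates host → Spec_host_candidates host (host_candidates host)

-- ===== LEMMAS AND PROOFS =====

-- the common reference value: the dot-joined suffixes with ≥ 2 parts, longest first
def pvSuffixes : List String → List String
  | x :: y :: rest => PySem.Str.join "." (x :: y :: rest) :: pvSuffixes (y :: rest)
  | _ => []

theorem pvSuffixes_cons (x : String) (rest : List String) (h : rest ≠ []) :
    pvSuffixes (x :: rest) = PySem.Str.join "." (x :: rest) :: pvSuffixes rest := by
  cases rest with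
  | nil => exact absurd rfl h
  | cons y t => rfl

theorem pvJoin_cons (x : String) (rest : List String) (h : rest ≠ []) :
    PySem.Str.join "." (x :: rest) = x ++ "." ++ PySem.Str.join "." rest := by
  cases rest with
  | nil => exact absurd rfl h
  | cons y t =>
    apply String.toList_inj.mp
    simp [PySem.Str.toList_join, String.toList_append, PySem.Chars.join_cons_cons]

theorem pvLen_mem_suffixes (l : List String) (s : String) (h : s ∈ pvSuffixes l) :
    s.toList.length ≤ (PySem.Str.join "." l).toList.length := by
  induction l with
  | nil => simp [pvSuffixes] at h
  | cons x rest ih =>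
    cases rest with
    | nil => simp [pvSuffixes] at h
    | cons y t =>
      rw [pvSuffixes_cons x (y::t) (by simp)] at h
      rcases List.mem_cons.mp h with h1 | h2
      · subst h1; rfl
      · have := ih h2
        rw [pvJoin_cons x (y::t) (by simp)]
        simp only [String.toList_append, List.length_append]
        omega

theorem pvSuffixes_nodup (l : List String) : (pvSuffixes l).Nodup := by
  induction l with
  | nil => simp [pvSuffixes]
  | cons x rest ih =>
    cases rest with
    | nil => simp [pvSuffixes]
    | cons y t =>
      rw [pvSuffixes_cons x (y::t) (by simp)]
      refine List.nodup_cons.mpr ⟨fun hmem => ?_, ih⟩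
      have h1 := pvLen_mem_suffixes (y::t) _ hmem
      rw [pvJoin_cons x (y::t) (by simp)] at h1
      simp only [String.toList_append, List.length_append] at h1
      have : ("." : String).toList.length = 1 := rfl
      omega

-- A's dedup loop is the identity on a Nodup list disjoint from `seen`
theorem pvDedup_id (l : List String) (seen : PySem.Set String) (res : List String)
    (hnd : l.Nodup) (hdis : ∀ x ∈ l, x ∉ seen) :
    (l.foldl (fun (st : PySem.Set String × List String) x =>
      if PySem.Set.contains st.1 x then st else (PySem.Set.add st.1 x, st.2 ++ [x])) (seen, res)).2
      = res ++ l := by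
  induction l generalizing seen res with
  | nil => simp
  | cons x t ih =>
    simp only [List.foldl_cons]
    have hc : PySem.Set.contains seen x = false := by
      rw [PySem.Set.contains_eq_decide]; simp [hdis x (by simp)]
    rw [hc]
    simp only [if_false, Bool.false_eq_true]
    rw [ih (PySem.Set.add seen x) (res ++ [x]) (List.nodup_cons.mp hnd).2 ?_]
    · simp
    · intro z hz hmem
      rcases (PySem.Set.mem_add seen x z).mp hmem with h1 | h2
      · exact hdis z (by simp [hz]) h1
      · exact (List.nodup_cons.mp hnd).1 (h2 ▸ hz)

-- A's candidate list (as an index map) is pvSuffixes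
theorem pvA_map (l : List String) (last : String) :
    (List.range l.length).map (fun i => PySem.Str.join "." ((l ++ [last]).drop i))
      = pvSuffixes (l ++ [last]) := by
  induction l with
  | nil => simp [pvSuffixes]
  | cons x t ih =>
    simp only [List.cons_append]
    rw [List.length_cons, List.range_succ_eq_map, List.map_cons, List.map_map]
    rw [pvSuffixes_cons x (t ++ [last]) (by simp)]
    refine congrArg₂ List.cons rfl ?_
    rw [← ih]
    apply List.map_congr_left
    intro i _
    rfl

-- B's tail-building fold produces pvSuffixes reversed (and the full join as final suffix)
theorem pvB_foldr (l : List String) (last : String) :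
    l.foldr (fun p (st : String × List String) =>
        (p ++ "." ++ st.1, st.2 ++ [p ++ "." ++ st.1])) (last, ([] : List String))
      = (PySem.Str.join "." (l ++ [last]), (pvSuffixes (l ++ [last])).reverse) := by
  induction l with
  | nil =>
    simp [pvSuffixes]
    apply String.toList_inj.mp
    simp [PySem.Str.toList_join, PySem.Chars.join_singleton]
  | cons x t ih =>
    simp only [List.cons_append]
    rw [List.foldr_cons, ih]
    rw [pvSuffixes_cons x (t ++ [last]) (by simp), pvJoin_cons x (t ++ [last]) (by simp)]
    simp

-- the '"." in cand' test is always true: a join of ≥ 2 parts contains a dot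
theorem pvIsIn_join (ll : List String) (h : 2 ≤ ll.length) :
    PySem.Str.isIn "." (PySem.Str.join "." ll) = true := by
  match ll, h with
  | a :: b :: t, _ =>
    have : ("." : String).toList = ['.'] := rfl
    simp only [PySem.Str.isIn_eq, PySem.Str.toList_join, List.map_cons,
      PySem.Chars.join_cons_cons, this]
    rw [PySem.Chars.isIn_iff_infix]
    exact ⟨a.toList, PySem.Chars.join ['.'] (b.toList :: t.map String.toList), by simp⟩

theorem pvGetLast (l : List String) (x : String) :
    PySem.List.pyGet? (l ++ [x]) (-1) = some x := by
  simp [PySem.List.pyGet?, PySem.List.pyIdx?]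

-- both bodies agree for an arbitrary parts list
theorem pvBody (parts : List String) :
    (((PySem.List.pyRange 0 ((parts.length : Int) - 1)).foldl
      (fun acc i =>
        let cand := PySem.Str.join "." (PySem.List.slice parts (some i) none)
        if PySem.Str.isIn "." cand then acc ++ [cand] else acc) []).foldl
      (fun (st : PySem.Set String × List String) x =>
        if PySem.Set.contains st.1 x then st else (PySem.Set.add st.1 x, st.2 ++ [x]))
      (PySem.Set.empty, ([] : List String))).2
    = (match PySem.List.pyGet? parts (-1) with
      | none => []
      | some last =>
        (((PySem.List.slice parts none (some (-1))).reverse).foldl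
          (fun (st : String × List String) p =>
            let suffix := p ++ "." ++ st.1
            (suffix, st.2 ++ [suffix])) (last, ([] : List String))).2.reverse) := by
  rcases List.eq_nil_or_concat parts with h | ⟨l, last, h⟩
  · subst h; rfl
  · rw [List.concat_eq_append] at h
    subst h
    -- B side
    rw [pvGetLast]
    simp only [PySem.List.slice_to_neg_one, List.dropLast_concat, List.foldl_reverse]
    rw [pvB_foldr]
    simp only [List.reverse_reverse]
    -- A side
    have hlen : (((l ++ [last]).length : Int) - 1) = ((l.length : Nat) : Int) := by
      simp
    rw [hlen, PySem.List.pyRange_zero_natCast]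
    rw [PySem.List.foldl_congr_mem _ _
      (fun acc i => acc ++ [PySem.Str.join "." (PySem.List.slice (l ++ [last]) (some i) none)]) _
      (by
        intro acc x hx
        simp only [List.mem_map, List.mem_range] at hx
        obtain ⟨i, hi, rfl⟩ := hx
        have hsl : PySem.List.slice (l ++ [last]) (some (i : Int)) none = (l ++ [last]).drop i :=
          PySem.List.slice_from_natCast _ _
        have h2 : 2 ≤ ((l ++ [last]).drop i).length := by
          simp [List.length_drop]; omega
        rw [pvIsIn_join _ (hsl ▸ h2)]
        simp)]
    rw [PySem.List.foldl_append_singleton_eq_map]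
    simp only [List.nil_append, List.map_map]
    have hmap : (List.range l.length).map
        ((fun i => PySem.Str.join "." (PySem.List.slice (l ++ [last]) (some i) none)) ∘ (fun k : Nat => (k : Int)))
        = pvSuffixes (l ++ [last]) := by
      rw [← pvA_map]
      apply List.map_congr_left
      intro i _
      simp only [Function.comp_apply, PySem.List.slice_from_natCast]
    rw [hmap]
    rw [pvDedup_id _ _ _ (pvSuffixes_nodup _) (by intro x _ hx; simp [PySem.Set.empty] at hx)]
    simp

-- ===== VERDICT (by name: the statement is the Claim_ definition above) =====
theorem host_candidates_spec : Claim_equal_host_candidates := by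
  intro host _
  unfold Spec_host_candidates
  exact pvBody ((PySem.Str.split? host ".").getD [])
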